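-- pv_equiv track=rewrite | github.com/InvestWise-SD/investwise | backend/app/services/jargon.py | suggest_related_terms
-- ===== SOURCE A (Python) =====
-- def suggest_related_terms(term: str) -> list[str]:
--     """Suggest related financial terms based on input."""
--     term_lower = term.lower()
--
--     # Category groupings
--     categories = {
--         "basics": ["stock", "bond", "dividend", "portfolio", "asset"],
--         "retirement": ["401k", "ira", "roth ira", "compound interest"],
--         "funds": ["etf", "index fund", "mutual fund"],
--         "risk": ["diversification", "risk tolerance", "volatility"],
--         "trading": ["broker", "commission", "capital gains", "capital loss"],
--     }
--
--     # Find which category the term belongs to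
--     for category, terms in categories.items():
--         if term_lower in terms:
--             # Return other terms in same category
--             return [t for t in terms if t != term_lower]
--
--     # Default: return beginner terms
--     return categories["basics"][:3]
-- ===== SOURCE B (Python) =====
-- _CATEGORIES = {
--     "basics": ["stock", "bond", "dividend", "portfolio", "asset"],
--     "retirement": ["401k", "ira", "roth ira", "compound interest"],
--     "funds": ["etf", "index fund", "mutual fund"],
--     "risk": ["diversification", "risk tolerance", "volatility"],
--     "trading": ["broker", "commission", "capital gains", "capital loss"],
-- }
--
-- # reverse index: term -> the other terms of its category, built once
-- _INDEX = {t: [s for s in terms if s != t]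
--           for terms in _CATEGORIES.values() for t in terms}
--
-- _DEFAULT = _CATEGORIES["basics"][:3]
--
--
-- def suggest_related_terms(term: str) -> list[str]:
--     """Suggest related financial terms based on input."""
--     return _INDEX.get(term.lower(), _DEFAULT)
-- ===== Notes on version B (the rewrite author's own statement) =====
-- stated objective: idiomatic
-- what changed: A scans every category list at call time looking for the term; B precomputes a reverse index (term -> its siblings) once at module load and the function body is a single dict lookup with the basics[:3] default.
import Mathlib
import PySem

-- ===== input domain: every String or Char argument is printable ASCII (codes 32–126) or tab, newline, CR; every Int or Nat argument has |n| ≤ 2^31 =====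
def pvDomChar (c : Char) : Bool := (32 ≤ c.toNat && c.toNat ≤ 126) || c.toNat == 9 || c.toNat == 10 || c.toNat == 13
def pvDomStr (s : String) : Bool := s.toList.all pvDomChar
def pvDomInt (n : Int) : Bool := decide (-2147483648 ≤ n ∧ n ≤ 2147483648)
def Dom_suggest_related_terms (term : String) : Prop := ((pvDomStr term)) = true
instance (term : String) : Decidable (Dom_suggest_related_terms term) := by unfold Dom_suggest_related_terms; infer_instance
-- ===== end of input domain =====

-- B replaces A's per-call category scan by a precomputed reverse index (term -> siblings)
-- so the body is a single dict lookup with the basics[:3] default; return values are identical.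

-- the constant `categories` dict, shared by both programs (A defines it inline, B at module level)
def pvCategories : PySem.Dict String (List String) :=
  PySem.Dict.ofList [("basics", ["stock", "bond", "dividend", "portfolio", "asset"]),
   ("retirement", ["401k", "ira", "roth ira", "compound interest"]),
   ("funds", ["etf", "index fund", "mutual fund"]),
   ("risk", ["diversification", "risk tolerance", "volatility"]),
   ("trading", ["broker", "commission", "capital gains", "capital loss"])]

-- ===== PORT A =====
-- A's for-loop over categories.items(): first category containing term_lower wins
def pvFindA (cats : List (String × List String)) (l : String) : Option (List String) :=
  match cats with
  | [] => none
  | (_, terms) :: rest =>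
      if terms.contains l then some (terms.filter (fun t => t != l)) else pvFindA rest l

def suggest_related_terms (term : String) : List String :=
  let term_lower := PySem.Str.lower term
  match pvFindA pvCategories.items term_lower with
  | some r => r
  | none => PySem.List.slice (PySem.Dict.getD pvCategories "basics" []) none (some 3)

-- ===== PORT B =====
-- reverse index built once: term -> other terms of its category
def pvIndex : PySem.Dict String (List String) :=
  pvCategories.items.foldl
    (fun d p => p.2.foldl (fun d t => PySem.Dict.insert d t (p.2.filter (fun s => s != t))) d)
    PySem.Dict.empty

def pvDefault : List String :=
  PySem.List.slice (PySem.Dict.getD pvCategories "basics" []) none (some 3)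

def suggest_related_terms_alt (term : String) : List String :=
  PySem.Dict.getD pvIndex (PySem.Str.lower term) pvDefault

-- ===== PRECONDITION & SPEC =====
def Spec_suggest_related_terms (term : String) (out : List String) : Prop := out = suggest_related_terms_alt term
instance (term : String) (out : List String) : Decidable (Spec_suggest_related_terms term out) := by unfold Spec_suggest_related_terms; infer_instance

-- ===== CLAIM (what is proved, stated in full; the proofs are below) =====
def Claim_equal_suggest_related_terms : Prop := ∀ (term : String), Dom_suggest_related_terms term → Spec_suggest_related_terms term (suggest_related_terms term)

-- ===== LEMMAS AND PROOFS =====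

-- both results depend only on the lowered string; agreement for every possible lowered string
theorem pvAgree (l : String) :
    (match pvFindA pvCategories.items l with
     | some r => r
     | none => PySem.List.slice (PySem.Dict.getD pvCategories "basics" []) none (some 3)) =
    PySem.Dict.getD pvIndex l pvDefault := by
  by_cases h1 : l = "stock"; · subst h1; decide
  by_cases h2 : l = "bond"; · subst h2; decide
  by_cases h3 : l = "dividend"; · subst h3; decide
  by_cases h4 : l = "portfolio"; · subst h4; decide
  by_cases h5 : l = "asset"; · subst h5; decide
  by_cases h6 : l = "401k"; · subst h6; decide
  by_cases h7 : l = "ira"; · subst h7; decide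
  by_cases h8 : l = "roth ira"; · subst h8; decide
  by_cases h9 : l = "compound interest"; · subst h9; decide
  by_cases h10 : l = "etf"; · subst h10; decide
  by_cases h11 : l = "index fund"; · subst h11; decide
  by_cases h12 : l = "mutual fund"; · subst h12; decide
  by_cases h13 : l = "diversification"; · subst h13; decide
  by_cases h14 : l = "risk tolerance"; · subst h14; decide
  by_cases h15 : l = "volatility"; · subst h15; decide
  by_cases h16 : l = "broker"; · subst h16; decide
  by_cases h17 : l = "commission"; · subst h17; decide
  by_cases h18 : l = "capital gains"; · subst h18; decide
  by_cases h19 : l = "capital loss"; · subst h19; decide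
  have hcats : pvCategories.items =
      [("basics", ["stock", "bond", "dividend", "portfolio", "asset"]),
       ("retirement", ["401k", "ira", "roth ira", "compound interest"]),
       ("funds", ["etf", "index fund", "mutual fund"]),
       ("risk", ["diversification", "risk tolerance", "volatility"]),
       ("trading", ["broker", "commission", "capital gains", "capital loss"])] := by rfl
  have hidx : pvIndex.items =
      [("stock", ["bond", "dividend", "portfolio", "asset"]),
       ("bond", ["stock", "dividend", "portfolio", "asset"]),
       ("dividend", ["stock", "bond", "portfolio", "asset"]),
       ("portfolio", ["stock", "bond", "dividend", "asset"]),
       ("asset", ["stock", "bond", "dividend", "portfolio"]),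
       ("401k", ["ira", "roth ira", "compound interest"]),
       ("ira", ["401k", "roth ira", "compound interest"]),
       ("roth ira", ["401k", "ira", "compound interest"]),
       ("compound interest", ["401k", "ira", "roth ira"]),
       ("etf", ["index fund", "mutual fund"]),
       ("index fund", ["etf", "mutual fund"]),
       ("mutual fund", ["etf", "index fund"]),
       ("diversification", ["risk tolerance", "volatility"]),
       ("risk tolerance", ["diversification", "volatility"]),
       ("volatility", ["diversification", "risk tolerance"]),
       ("broker", ["commission", "capital gains", "capital loss"]),
       ("commission", ["broker", "capital gains", "capital loss"]),
       ("capital gains", ["broker", "commission", "capital loss"]),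
       ("capital loss", ["broker", "commission", "capital gains"])] := by rfl
  have hA : pvFindA pvCategories.items l = none := by
    rw [hcats]
    simp [pvFindA, h1, h2, h3, h4, h5, h6, h7, h8, h9, h10,
          h11, h12, h13, h14, h15, h16, h17, h18, h19]
  have e1 : ("stock" == l) = false := by simp [Ne.symm h1]
  have e2 : ("bond" == l) = false := by simp [Ne.symm h2]
  have e3 : ("dividend" == l) = false := by simp [Ne.symm h3]
  have e4 : ("portfolio" == l) = false := by simp [Ne.symm h4]
  have e5 : ("asset" == l) = false := by simp [Ne.symm h5]
  have e6 : ("401k" == l) = false := by simp [Ne.symm h6]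
  have e7 : ("ira" == l) = false := by simp [Ne.symm h7]
  have e8 : ("roth ira" == l) = false := by simp [Ne.symm h8]
  have e9 : ("compound interest" == l) = false := by simp [Ne.symm h9]
  have e10 : ("etf" == l) = false := by simp [Ne.symm h10]
  have e11 : ("index fund" == l) = false := by simp [Ne.symm h11]
  have e12 : ("mutual fund" == l) = false := by simp [Ne.symm h12]
  have e13 : ("diversification" == l) = false := by simp [Ne.symm h13]
  have e14 : ("risk tolerance" == l) = false := by simp [Ne.symm h14]
  have e15 : ("volatility" == l) = false := by simp [Ne.symm h15]
  have e16 : ("broker" == l) = false := by simp [Ne.symm h16]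
  have e17 : ("commission" == l) = false := by simp [Ne.symm h17]
  have e18 : ("capital gains" == l) = false := by simp [Ne.symm h18]
  have e19 : ("capital loss" == l) = false := by simp [Ne.symm h19]
  have hB : PySem.Dict.get? pvIndex l = none := by
    simp [PySem.Dict.get?, hidx, List.find?, e1, e2, e3, e4, e5, e6, e7, e8, e9, e10,
          e11, e12, e13, e14, e15, e16, e17, e18, e19]
  rw [hA]
  simp [PySem.Dict.getD, hB, pvDefault]

-- ===== VERDICT (by name: the statement is the Claim_ definition above) =====
theorem suggest_related_terms_spec : Claim_equal_suggest_related_terms := by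
  intro term _
  unfold Spec_suggest_related_terms suggest_related_terms suggest_related_terms_alt
  exact pvAgree (PySem.Str.lower term)
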